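-- pv_equiv track=rewrite | github.com/MrCaseDev/Python-MinTic | Actividad_01/Ejercicio_02.py | letras_unicas_ordenadas
-- ===== SOURCE A (Python) =====
-- def letras_unicas_ordenadas(word):
--     word_array = []
--     letra = ""
--     posicion = 0
--
--     #Genero una lista
--     for letra in word:
--         word_array.append(letra.upper())
--
--     # Elimina duplicados
--     while posicion < len(word_array):
--         letra = word_array[posicion]
--         i = posicion + 1
--         while i < len(word_array):
--             if letra == word_array[i]:
--                 del word_array[i]
--             else:
--                 i += 1
--         posicion += 1
--     # Ordena alfabéticamente
--     word_array.sort()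
--     return word_array
-- ===== SOURCE B (Python) =====
-- def letras_unicas_ordenadas(word):
--     chars = sorted(c.upper() for c in word)
--     out = []
--     for ch in chars:
--         if not out or out[-1] != ch:
--             out.append(ch)
--     return out
-- ===== Notes on version B (the rewrite author's own statement) =====
-- stated objective: faster
-- what changed: Replaces A's quadratic repeated-scan-and-delete dedup followed by a sort with sort-first then a single linear adjacent-dedup pass.
import Mathlib
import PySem

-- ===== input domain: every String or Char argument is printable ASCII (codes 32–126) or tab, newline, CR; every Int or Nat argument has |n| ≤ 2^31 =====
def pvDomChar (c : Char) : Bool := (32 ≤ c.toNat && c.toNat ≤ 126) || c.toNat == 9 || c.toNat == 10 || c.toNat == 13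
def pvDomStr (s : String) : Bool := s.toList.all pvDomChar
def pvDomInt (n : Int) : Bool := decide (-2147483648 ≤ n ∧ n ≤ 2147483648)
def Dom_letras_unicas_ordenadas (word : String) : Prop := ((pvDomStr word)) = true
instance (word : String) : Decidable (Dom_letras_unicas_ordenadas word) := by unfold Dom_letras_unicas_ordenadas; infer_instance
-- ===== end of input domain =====

-- B sorts the uppercased characters first and deduplicates in one adjacent-compare pass,
-- instead of A's repeated-scan-and-delete dedup followed by a sort.

-- ===== PORT A =====
-- inner while loop: deletes every occurrence of `letra` at positions ≥ i (del shifts, so i stays).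
-- The fuel argument only totalizes the loop; with the fuel supplied below it never runs out.
def pvInner : Nat → String → List String → Nat → List String
  | 0, _, arr, _ => arr
  | fuel + 1, letra, arr, i =>
    if h : i < arr.length then
      if arr[i] == letra then pvInner fuel letra (arr.eraseIdx i) i
      else pvInner fuel letra arr (i + 1)
    else arr

-- outer while loop over posicion (fuel likewise only totalizes)
def pvOuter : Nat → List String → Nat → List String
  | 0, arr, _ => arr
  | fuel + 1, arr, pos =>
    if h : pos < arr.length then
      pvOuter fuel (pvInner arr.length arr[pos] arr (pos + 1)) (pos + 1)
    else arr

def letras_unicas_ordenadas (word : String) : List String :=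
  -- for letra in word: word_array.append(letra.upper())
  let word_array := word.toList.foldl
    (fun acc letra => acc ++ [PySem.Str.upper (String.ofList [letra])]) []
  -- the nested while loops removing duplicates
  let word_array := pvOuter word_array.length word_array 0
  -- word_array.sort()
  PySem.List.sorted word_array (fun x => x) false

-- ===== PORT B =====
def letras_unicas_ordenadas_alt (word : String) : List String :=
  -- chars = sorted(c.upper() for c in word)
  let chars := PySem.List.sorted
    (word.toList.map (fun c => PySem.Str.upper (String.ofList [c]))) (fun x => x) false
  -- for ch in chars: if not out or out[-1] != ch: out.append(ch)
  chars.foldl (fun out ch => if out.getLast? == some ch then out else out ++ [ch]) []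

-- ===== PRECONDITION & SPEC =====
def Spec_letras_unicas_ordenadas (word : String) (out : List String) : Prop := out = letras_unicas_ordenadas_alt word
instance (word : String) (out : List String) : Decidable (Spec_letras_unicas_ordenadas word out) := by unfold Spec_letras_unicas_ordenadas; infer_instance

-- ===== CLAIM (what is proved, stated in full; the proofs are below) =====
def Claim_equal_letras_unicas_ordenadas : Prop := ∀ (word : String), Dom_letras_unicas_ordenadas word → Spec_letras_unicas_ordenadas word (letras_unicas_ordenadas word)

-- ===== LEMMAS AND PROOFS =====

-- first-occurrence dedup, the value computed by A's nested while loops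
def pvDed : List String → List String
  | [] => []
  | h :: t => h :: pvDed (t.filter (fun x => !(x == h)))
termination_by l => l.length
decreasing_by
  simp only [List.length_cons, List.length_unattach]
  exact Nat.lt_succ_of_le (le_trans (List.length_filter_le _ _) (le_of_eq List.length_attach))

theorem pvDed_nil : pvDed [] = [] := by rw [pvDed.eq_def]

theorem pvDed_cons (h : String) (t : List String) :
    pvDed (h :: t) = h :: pvDed (t.filter (fun x => !(x == h))) := by rw [pvDed.eq_def]

theorem pvInner_eq (letra : String) (fuel : Nat) (arr : List String) (i : Nat)
    (hfuel : arr.length - i ≤ fuel) :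
    pvInner fuel letra arr i = arr.take i ++ (arr.drop i).filter (fun x => !(x == letra)) := by
  induction fuel generalizing arr i with
  | zero =>
      have hle : arr.length ≤ i := by omega
      rw [pvInner, List.take_of_length_le hle, List.drop_of_length_le hle]
      simp
  | succ fuel ih =>
      rw [pvInner]
      split
      · rename_i h
        have hd : arr.drop i = arr[i] :: arr.drop (i + 1) := List.drop_eq_getElem_cons h
        have hg : arr[i]? = some arr[i] := List.getElem?_eq_getElem h
        by_cases heq : (arr[i] == letra) = true
        · rw [if_pos heq]
          have hlen : (arr.eraseIdx i).length = arr.length - 1 := by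
            simp [List.length_eraseIdx, h]
          rw [ih (arr.eraseIdx i) i (by omega), List.eraseIdx_eq_take_drop_succ]
          have ht : (List.take i arr).length = i := by simp; omega
          rw [List.take_append_of_le_length (le_of_eq ht.symm),
              List.drop_append_of_le_length (le_of_eq ht.symm),
              List.take_take, List.drop_of_length_le (le_of_eq ht), hd, List.filter_cons]
          simp [heq]
        · rw [if_neg heq]
          have htake : arr.take (i + 1) = arr.take i ++ [arr[i]] := by
            rw [List.take_add_one, hg]; rfl
          have hb : (!(arr[i] == letra)) = true := by simp [heq]
          rw [ih arr (i + 1) (by omega), hd, List.filter_cons, if_pos hb, htake,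
              List.append_assoc, List.singleton_append]
      · rename_i h
        rw [List.take_of_length_le (by omega), List.drop_of_length_le (by omega)]
        simp

theorem pvOuter_eq (fuel : Nat) (arr : List String) (pos : Nat)
    (hfuel : arr.length - pos ≤ fuel) :
    pvOuter fuel arr pos = arr.take pos ++ pvDed (arr.drop pos) := by
  induction fuel generalizing arr pos with
  | zero =>
      have hle : arr.length ≤ pos := by omega
      rw [pvOuter, List.take_of_length_le hle, List.drop_of_length_le hle]
      simp [pvDed_nil]
  | succ fuel ih =>
      rw [pvOuter]
      split
      · rename_i h
        have hd : arr.drop pos = arr[pos] :: arr.drop (pos + 1) := List.drop_eq_getElem_cons h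
        have hg : arr[pos]? = some arr[pos] := List.getElem?_eq_getElem h
        have hinner := pvInner_eq arr[pos] arr.length arr (pos + 1) (by omega)
        have hlen : (pvInner arr.length arr[pos] arr (pos + 1)).length =
            (pos + 1) + ((arr.drop (pos + 1)).filter (fun x => !(x == arr[pos]))).length := by
          rw [hinner]
          simp; omega
        have hflen := List.length_filter_le (fun x => !(x == arr[pos])) (arr.drop (pos + 1))
        have hdlen : (arr.drop (pos + 1)).length = arr.length - (pos + 1) := by simp
        rw [ih (pvInner arr.length arr[pos] arr (pos + 1)) (pos + 1) (by omega), hinner]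
        have ht : (List.take (pos + 1) arr).length = pos + 1 := by simp; omega
        rw [List.take_append_of_le_length (le_of_eq ht.symm),
            List.drop_append_of_le_length (le_of_eq ht.symm),
            List.take_take, List.drop_of_length_le (le_of_eq ht), hd, pvDed_cons]
        have htake : arr.take (pos + 1) = arr.take pos ++ [arr[pos]] := by
          rw [List.take_add_one, hg]; rfl
        rw [Nat.min_self, List.nil_append, htake, List.append_assoc, List.singleton_append]
      · rename_i h
        rw [List.take_of_length_le (by omega), List.drop_of_length_le (by omega)]
        simp [pvDed_nil]

theorem mem_pvDed (l : List String) (x : String) : x ∈ pvDed l ↔ x ∈ l := by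
  match l with
  | [] => simp [pvDed_nil]
  | h :: t =>
      have ih := mem_pvDed (t.filter (fun y => !(y == h))) x
      rw [pvDed_cons]
      simp only [List.mem_cons, ih, List.mem_filter]
      by_cases hx : x = h <;> simp [hx]
termination_by l.length
decreasing_by
  have := List.length_filter_le (fun y => !(y == h)) t
  simp only [List.length_cons]; omega

theorem nodup_pvDed (l : List String) : (pvDed l).Nodup := by
  match l with
  | [] => simp [pvDed_nil]
  | h :: t =>
      have ih := nodup_pvDed (t.filter (fun y => !(y == h)))
      rw [pvDed_cons, List.nodup_cons]
      refine ⟨fun hmem => ?_, ih⟩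
      rw [mem_pvDed, List.mem_filter] at hmem
      simp at hmem
termination_by l.length
decreasing_by
  have := List.length_filter_le (fun y => !(y == h)) t
  simp only [List.length_cons]; omega

theorem mem_le_getLast (l : List String) (h : l.Pairwise (· < ·)) (x : String) (hx : x ∈ l)
    (L : String) (hL : l.getLast? = some L) : x ≤ L := by
  induction l with
  | nil => simp at hx
  | cons a t ih =>
      rcases List.pairwise_cons.mp h with ⟨ha, ht⟩
      cases t with
      | nil => simp at hL hx; simp [hx, hL]
      | cons b u =>
          rw [List.getLast?_cons_cons] at hL
          rcases List.mem_cons.mp hx with rfl | hx'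
          · have hLmem : L ∈ b :: u := List.mem_of_getLast? hL
            exact le_of_lt (ha L hLmem)
          · exact ih ht hx' hL

theorem adj_fold (chars : List String) (acc : List String)
    (hacc : acc.Pairwise (· < ·)) (hch : chars.Pairwise (· ≤ ·))
    (hsep : ∀ a ∈ acc, ∀ c ∈ chars, a ≤ c) :
    (chars.foldl (fun out ch => if out.getLast? == some ch then out else out ++ [ch]) acc).Pairwise (· < ·) ∧
    ∀ x, (x ∈ chars.foldl (fun out ch => if out.getLast? == some ch then out else out ++ [ch]) acc ↔ x ∈ acc ∨ x ∈ chars) := by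
  induction chars generalizing acc with
  | nil => simpa using hacc
  | cons ch rest ih =>
      rcases List.pairwise_cons.mp hch with ⟨hch1, hch2⟩
      simp only [List.foldl_cons]
      by_cases hcase : acc.getLast? == some ch
      · rw [if_pos hcase]
        have hchmem : ch ∈ acc := List.mem_of_getLast? (beq_iff_eq.mp hcase)
        have ⟨h1, h2⟩ := ih acc hacc hch2 (fun a ha c hc =>
          le_trans (hsep a ha ch (List.mem_cons_self)) (hch1 c hc))
        refine ⟨h1, fun x => ?_⟩
        rw [h2 x]
        constructor
        · rintro (h | h) <;> simp [h]
        · rintro (h | h)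
          · exact Or.inl h
          · rcases List.mem_cons.mp h with rfl | h'
            · exact Or.inl hchmem
            · exact Or.inr h'
      · rw [if_neg hcase]
        have hne : ∀ a ∈ acc, a < ch := by
          intro a ha
          have hle : a ≤ ch := hsep a ha ch List.mem_cons_self
          rcases lt_or_eq_of_le hle with hlt | rfl
          · exact hlt
          · exfalso
            cases hL : acc.getLast? with
            | none => exact (List.ne_nil_of_mem ha) (List.getLast?_eq_none_iff.mp hL)
            | some L =>
                have h1 : a ≤ L := mem_le_getLast acc hacc a ha L hL
                have h2 : L ≤ a := hsep L (List.mem_of_getLast? hL) a List.mem_cons_self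
                have : L = a := le_antisymm h2 h1
                subst this
                simp [hL] at hcase
        have hacc' : (acc ++ [ch]).Pairwise (· < ·) := by
          rw [List.pairwise_append]
          exact ⟨hacc, List.pairwise_singleton _ _, fun a ha c hc => by
            rcases List.mem_singleton.mp hc with rfl; exact hne a ha⟩
        have hsep' : ∀ a ∈ acc ++ [ch], ∀ c ∈ rest, a ≤ c := by
          intro a ha c hc
          rcases List.mem_append.mp ha with h' | h'
          · exact hsep a h' c (List.mem_cons_of_mem _ hc)
          · rcases List.mem_singleton.mp h' with rfl; exact hch1 c hc
        have ⟨h1, h2⟩ := ih (acc ++ [ch]) hacc' hch2 hsep'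
        refine ⟨h1, fun x => ?_⟩
        rw [h2 x]
        simp [List.mem_append, or_assoc]

-- ===== VERDICT (by name: the statement is the Claim_ definition above) =====
theorem letras_unicas_ordenadas_spec : Claim_equal_letras_unicas_ordenadas := by
  intro word _
  unfold Spec_letras_unicas_ordenadas letras_unicas_ordenadas letras_unicas_ordenadas_alt
  simp only [PySem.List.foldl_append_singleton_eq_map, List.nil_append]
  set ups := word.toList.map (fun c => PySem.Str.upper (String.ofList [c])) with hups
  rw [pvOuter_eq ups.length ups 0 (by omega)]
  simp only [List.take_zero, List.drop_zero, List.nil_append]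
  set ss := PySem.List.sorted ups (fun x => x) false with hss
  have hpair : ss.Pairwise (· ≤ ·) := PySem.List.sorted_pairwise ups (fun x => x)
  have ⟨h1, h2⟩ := adj_fold ss [] (List.Pairwise.nil) hpair (by intro a ha; simp at ha)
  set B := ss.foldl (fun out ch => if out.getLast? == some ch then out else out ++ [ch]) [] with hB
  have hmemB : ∀ x, x ∈ B ↔ x ∈ ups := by
    intro x
    rw [h2 x]
    simp [hss, PySem.List.mem_sorted]
  have hperm : B.Perm (pvDed ups) := by
    rw [List.perm_ext_iff_of_nodup (h1.nodup) (nodup_pvDed ups)]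
    intro x; rw [hmemB x, mem_pvDed]
  exact PySem.List.sorted_eq_of_perm_of_pairwise_lt _ _ (fun x => x) hperm h1
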